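-- pv_equiv track=rewrite | github.com/CreeperBoom07/USE_Informatics | Задание 14 Системы счисления/Домашняя работа/# 20.py | f
-- ===== SOURCE A (Python) =====
-- def f(n):
--     k = 0
--     while n:
--         k += 1
--         if k > 4:
--             return False
--         n //= 5
--     return True
-- ===== SOURCE B (Python) =====
-- def f(n):
--     # "at most 4 base-5 digits": n in [0, 5**4); negatives loop to -1 forever in A and come out False
--     return 0 <= n < 625
-- ===== Notes on version B (the rewrite author's own statement) =====
-- stated objective: simpler
-- what changed: Replaces the digit-counting floor-division loop with the closed-form range test 0 <= n < 625 (= 5**4).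
import Mathlib
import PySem

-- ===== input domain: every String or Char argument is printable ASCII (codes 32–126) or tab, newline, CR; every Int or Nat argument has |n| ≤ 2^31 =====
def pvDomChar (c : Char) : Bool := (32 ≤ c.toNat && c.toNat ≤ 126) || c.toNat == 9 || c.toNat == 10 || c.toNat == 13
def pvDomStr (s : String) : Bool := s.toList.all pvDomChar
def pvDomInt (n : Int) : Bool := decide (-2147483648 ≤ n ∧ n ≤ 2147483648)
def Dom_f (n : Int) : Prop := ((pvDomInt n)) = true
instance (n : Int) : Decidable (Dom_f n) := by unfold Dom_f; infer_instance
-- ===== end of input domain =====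

-- B replaces A's base-5 digit-counting loop with the closed-form range test 0 ≤ n < 625 (simpler).

-- ===== PORT A =====
-- the while loop of A: state (n, k); returns False as soon as k exceeds 4
def fLoop (n : Int) (k : Nat) : Bool :=
  if n ≠ 0 then
    if k + 1 > 4 then false
    else fLoop (PySem.Int.floordiv n 5) (k + 1)
  else true
termination_by 4 - k
decreasing_by omega

def f (n : Int) : Bool := fLoop n 0

-- ===== PORT B =====
def f_alt (n : Int) : Bool := decide (0 ≤ n ∧ n < 625)

-- ===== PRECONDITION & SPEC =====
def Spec_f (n : Int) (out : Bool) : Prop := out = f_alt n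
instance (n : Int) (out : Bool) : Decidable (Spec_f n out) := by unfold Spec_f; infer_instance

-- ===== CLAIM (what is proved, stated in full; the proofs are below) =====
def Claim_equal_f : Prop := ∀ (n : Int), Dom_f n → Spec_f n (f n)

-- ===== LEMMAS AND PROOFS =====
lemma fLoop4 (n : Int) : fLoop n 4 = decide (0 ≤ n ∧ n < 1) := by
  rw [fLoop]
  by_cases h : n = 0 <;> simp [h]; omega

lemma fLoop3 (n : Int) : fLoop n 3 = decide (0 ≤ n ∧ n < 5) := by
  rw [fLoop]
  by_cases h : n = 0
  · simp [h]
  · simp only [h, ne_eq, not_false_eq_true, ite_true]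
    rw [fLoop4, PySem.Int.floordiv_eq_ediv_of_pos (by omega : (0:Int) < 5),
      if_neg (by omega), decide_eq_decide]
    constructor <;> intro <;> omega

lemma fLoop2 (n : Int) : fLoop n 2 = decide (0 ≤ n ∧ n < 25) := by
  rw [fLoop]
  by_cases h : n = 0
  · simp [h]
  · simp only [h, ne_eq, not_false_eq_true, ite_true]
    rw [fLoop3, PySem.Int.floordiv_eq_ediv_of_pos (by omega : (0:Int) < 5),
      if_neg (by omega), decide_eq_decide]
    constructor <;> intro <;> omega

lemma fLoop1 (n : Int) : fLoop n 1 = decide (0 ≤ n ∧ n < 125) := by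
  rw [fLoop]
  by_cases h : n = 0
  · simp [h]
  · simp only [h, ne_eq, not_false_eq_true, ite_true]
    rw [fLoop2, PySem.Int.floordiv_eq_ediv_of_pos (by omega : (0:Int) < 5),
      if_neg (by omega), decide_eq_decide]
    constructor <;> intro <;> omega

lemma fLoop0 (n : Int) : fLoop n 0 = decide (0 ≤ n ∧ n < 625) := by
  rw [fLoop]
  by_cases h : n = 0
  · simp [h]
  · simp only [h, ne_eq, not_false_eq_true, ite_true]
    rw [fLoop1, PySem.Int.floordiv_eq_ediv_of_pos (by omega : (0:Int) < 5),
      if_neg (by omega), decide_eq_decide]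
    constructor <;> intro <;> omega

-- ===== VERDICT (by name: the statement is the Claim_ definition above) =====
theorem f_spec : Claim_equal_f := fun n _ => fLoop0 n
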